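-- pv_equiv track=rewrite | github.com/CodingThrust/problem-reductions | docs/paper/verify-reductions/verify_k_satisfiability_register_sufficiency.py | solve_register_brute
-- ===== SOURCE A (Python) =====
-- def solve_register_brute(num_vertices: int, arcs: list[tuple[int, int]],
--                          bound: int) -> list[int] | None:
--     """Find a topological ordering achieving <= bound registers.
--     Returns config (vertex->position) or None."""
--     n = num_vertices
--     if n == 0:
--         return []
--     if n > 12:
--         return None  # too slow for brute force
--
--     preds = [set() for _ in range(n)]
--     succs = [set() for _ in range(n)]
--     for v, u in arcs:
--         preds[v].add(u)
--         succs[u].add(v)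
--
--     result = [None]
--
--     def backtrack(order, evaluated, live_set, current_max):
--         if result[0] is not None:
--             return
--         step = len(order)
--         if step == n:
--             if current_max <= bound:
--                 config = [0] * n
--                 for pos, vertex in enumerate(order):
--                     config[vertex] = pos
--                 result[0] = config
--             return
--         if current_max > bound:
--             return
--         available = [v for v in range(n)
--                      if v not in evaluated and preds[v] <= evaluated]
--         available.sort(
--             key=lambda v: -sum(1 for u in live_set
--                                if succs[u] and succs[u] <= (evaluated | {v})))
--         for v in available:
--             evaluated.add(v)
--             order.append(v)
--             new_live = live_set | {v}
--             freed = {u for u in new_live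
--                      if succs[u] and succs[u] <= evaluated}
--             new_live_after = new_live - freed
--             new_max = max(current_max, len(new_live_after))
--             backtrack(order, evaluated, new_live_after, new_max)
--             order.pop()
--             evaluated.discard(v)
--
--     backtrack([], set(), set(), 0)
--     return result[0]
-- ===== SOURCE B (Python) =====
-- def solve_register_brute(num_vertices: int, arcs: list[tuple[int, int]],
--                          bound: int) -> list[int] | None:
--     """Decision-then-reconstruction: a memoized feasibility oracle over
--     evaluated-subsets, then a greedy walk that follows the same priority
--     order and only ever steps into feasible children."""
--     n = num_vertices
--     if n == 0:
--         return []
--     if n > 12: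
--         return None  # too slow for brute force
--
--     preds = [set() for _ in range(n)]
--     succs = [set() for _ in range(n)]
--     for v, u in arcs:
--         preds[v].add(u)
--         succs[u].add(v)
--
--     def live(ev):
--         return {u for u in ev if not (succs[u] and succs[u] <= ev)}
--
--     def avail(ev):
--         return [v for v in range(n) if v not in ev and preds[v] <= ev]
--
--     memo = {}
--
--     def feasible(ev):
--         if len(ev) == n:
--             return True
--         r = memo.get(ev)
--         if r is None:
--             r = any(len(live(ev | {v})) <= bound and feasible(ev | {v})
--                     for v in avail(ev))
--             memo[ev] = r
--         return r
--
--     ev = frozenset()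
--     if not feasible(ev):
--         return None
--     order = []
--     for _ in range(n):
--         cand = avail(ev)
--         lv = live(ev)
--         cand.sort(key=lambda v: -sum(1 for u in lv
--                                      if succs[u] and succs[u] <= (ev | {v})))
--         v = next(w for w in cand
--                  if len(live(ev | {w})) <= bound and feasible(ev | {w}))
--         order.append(v)
--         ev = ev | {v}
--     config = [0] * n
--     for pos, vertex in enumerate(order):
--         config[vertex] = pos
--     return config
-- ===== Notes on version B (the rewrite author's own statement) =====
-- stated objective: faster
-- what changed: Replaces A's factorial backtracking over all topological orderings by a memoized subset feasibility oracle plus a greedy reconstruction walk that follows A's priority order and only steps into feasible children, returning the identical ordering.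
import Mathlib
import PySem

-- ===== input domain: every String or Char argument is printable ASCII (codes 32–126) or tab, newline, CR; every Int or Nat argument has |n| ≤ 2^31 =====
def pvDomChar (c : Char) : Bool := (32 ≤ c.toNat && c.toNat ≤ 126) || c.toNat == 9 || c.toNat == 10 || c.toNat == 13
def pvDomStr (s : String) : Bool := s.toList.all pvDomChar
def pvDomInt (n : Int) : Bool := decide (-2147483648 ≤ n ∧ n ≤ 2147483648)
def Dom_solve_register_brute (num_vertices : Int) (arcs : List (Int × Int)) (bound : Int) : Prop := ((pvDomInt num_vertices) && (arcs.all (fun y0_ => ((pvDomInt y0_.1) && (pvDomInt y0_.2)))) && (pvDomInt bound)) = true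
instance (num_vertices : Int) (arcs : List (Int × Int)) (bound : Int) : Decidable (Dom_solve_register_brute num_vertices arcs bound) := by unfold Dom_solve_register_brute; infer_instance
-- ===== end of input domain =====

-- B replaces A's factorial backtracking over all topological orderings by a memoized subset
-- feasibility oracle plus a greedy reconstruction walk following A's priority order.

-- ===== PORT A =====
-- helpers shared by both ports (the same Python lines occur verbatim in A and in B):
-- `preds = [set() ...]; succs = [set() ...]; for v, u in arcs: preds[v].add(u); succs[u].add(v)`
-- (pySetD/pyGetD model Python's negative-index wraparound exactly; out-of-range indices, on
-- which Python raises IndexError, are excluded by Pre_solve_register_brute)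
def pvEmptyRow (n : Int) : List (PySem.Set Int) :=
  (PySem.List.pyRange 0 n 1).map (fun _ => PySem.Set.empty)

def pvAdj (n : Int) (arcs : List (Int × Int)) : List (PySem.Set Int) × List (PySem.Set Int) :=
  arcs.foldl (fun ps a =>
    (PySem.List.pySetD ps.1 a.1 (PySem.Set.add (PySem.List.pyGetD ps.1 a.1 PySem.Set.empty) a.2),
     PySem.List.pySetD ps.2 a.2 (PySem.Set.add (PySem.List.pyGetD ps.2 a.2 PySem.Set.empty) a.1)))
    (pvEmptyRow n, pvEmptyRow n)

-- succs[u] (read only at in-range u in both programs)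
def pvS (succs : List (PySem.Set Int)) (u : Int) : PySem.Set Int :=
  PySem.List.pyGetD succs u PySem.Set.empty

-- the sort key: -sum(1 for u in live if succs[u] and succs[u] <= (evaluated | {v}))
def pvKey (succs : List (PySem.Set Int)) (evaluated : PySem.Set Int) (live : List Int) (v : Int) : Int :=
  -((live.map (fun u =>
      if (!(pvS succs u).isEmpty && PySem.Set.issubset (pvS succs u) (PySem.Set.union evaluated [v]))
      then (1 : Int) else 0)).sum)

-- [v for v in range(n) if v not in evaluated and preds[v] <= evaluated]
def pvAvail (n : Int) (preds : List (PySem.Set Int)) (evaluated : PySem.Set Int) : List Int :=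
  (PySem.List.pyRange 0 n 1).filter (fun v =>
    !(PySem.Set.contains evaluated v) &&
    PySem.Set.issubset (PySem.List.pyGetD preds v PySem.Set.empty) evaluated)

def pvSortedAvail (n : Int) (preds succs : List (PySem.Set Int))
    (evaluated : PySem.Set Int) (live : List Int) : List Int :=
  PySem.List.sorted (pvAvail n preds evaluated) (pvKey succs evaluated live) false

-- config = [0]*n; for pos, vertex in enumerate(order): config[vertex] = pos
def pvConfig (n : Int) (order : List Int) : List Int :=
  (PySem.List.enumerate order).foldl
    (fun cfg pv => PySem.List.pySetD cfg pv.2 pv.1) (List.replicate n.toNat 0)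

-- new_live = live | {v}; freed = {u in new_live if succs[u] and succs[u] <= evaluated};
-- new_live - freed  (evaluated already contains v at this point in A)
def pvStepLive (succs : List (PySem.Set Int)) (evaluated' live : PySem.Set Int) (v : Int) : PySem.Set Int :=
  PySem.Set.diff (PySem.Set.union live [v])
    ((PySem.Set.union live [v]).filter (fun u =>
      !(pvS succs u).isEmpty && PySem.Set.issubset (pvS succs u) evaluated'))

-- A's backtrack; the result[0]-based early return is first-some over the sorted candidates.
-- fuel (= n - len(order) at every call) only makes the recursion structural; it never runs out.
def btA (n : Int) (preds succs : List (PySem.Set Int)) (bound : Int) :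
    Nat → List Int → PySem.Set Int → PySem.Set Int → Int → Option (List Int)
  | 0, order, _, _, cmax =>
    if (order.length : Int) = n then
      (if cmax ≤ bound then some (pvConfig n order) else none)
    else none
  | fuel + 1, order, evaluated, live, cmax =>
    if (order.length : Int) = n then
      (if cmax ≤ bound then some (pvConfig n order) else none)
    else if bound < cmax then none
    else
      (pvSortedAvail n preds succs evaluated live).findSome? (fun v =>
        btA n preds succs bound fuel (order ++ [v]) (PySem.Set.add evaluated v)
          (pvStepLive succs (PySem.Set.add evaluated v) live v)
          (max cmax ((pvStepLive succs (PySem.Set.add evaluated v) live v).length : Int)))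

def solve_register_brute (num_vertices : Int) (arcs : List (Int × Int)) (bound : Int) : Option (List Int) :=
  if num_vertices = 0 then some []
  else if 12 < num_vertices then none
  else
    btA num_vertices (pvAdj num_vertices arcs).1 (pvAdj num_vertices arcs).2 bound
      num_vertices.toNat [] PySem.Set.empty PySem.Set.empty 0

-- ===== PORT B =====
-- live(ev) = {u for u in ev if not (succs[u] and succs[u] <= ev)}
def pvLive (succs : List (PySem.Set Int)) (ev : PySem.Set Int) : PySem.Set Int :=
  ev.filter (fun u => !(!(pvS succs u).isEmpty && PySem.Set.issubset (pvS succs u) ev))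

-- feasible(ev); Source B memoizes it in a dict — the memo is value-transparent and elided here.
-- fuel (= n - len(ev) at every call) only makes the recursion structural; it never runs out.
def pvFeas (n : Int) (preds succs : List (PySem.Set Int)) (bound : Int) :
    Nat → PySem.Set Int → Bool
  | 0, ev => if PySem.Set.len ev = n then true else false
  | fuel + 1, ev =>
    if PySem.Set.len ev = n then true
    else (pvAvail n preds ev).any (fun v =>
      decide (((pvLive succs (PySem.Set.add ev v)).length : Int) ≤ bound) &&
      pvFeas n preds succs bound fuel (PySem.Set.add ev v))

-- the reconstruction loop: n times pick the first sorted candidate with a feasible child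
def pvWalk (n : Int) (preds succs : List (PySem.Set Int)) (bound : Int) :
    Nat → PySem.Set Int → List Int
  | 0, _ => []
  | fuel + 1, ev =>
    match (pvSortedAvail n preds succs ev (pvLive succs ev)).find? (fun v =>
        decide (((pvLive succs (PySem.Set.add ev v)).length : Int) ≤ bound) &&
        pvFeas n preds succs bound fuel (PySem.Set.add ev v)) with
    | some v => v :: pvWalk n preds succs bound fuel (PySem.Set.add ev v)
    | none => []  -- unreachable: the walk is only entered on feasible states

def solve_register_brute_alt (num_vertices : Int) (arcs : List (Int × Int)) (bound : Int) : Option (List Int) :=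
  if num_vertices = 0 then some []
  else if 12 < num_vertices then none
  else
    if pvFeas num_vertices (pvAdj num_vertices arcs).1 (pvAdj num_vertices arcs).2 bound
        num_vertices.toNat PySem.Set.empty then
      some (pvConfig num_vertices
        (pvWalk num_vertices (pvAdj num_vertices arcs).1 (pvAdj num_vertices arcs).2 bound
          num_vertices.toNat PySem.Set.empty))
    else none

-- ===== PRECONDITION & SPEC =====
-- Pre_ excludes exactly the inputs on which Python A raises IndexError: some arc endpoint
-- outside [-n, n) while the arcs are actually indexed (0 < n ≤ 12 or n < 0; for n = 0 and
-- n > 12 A returns before touching the arcs). A returns normally on every admitted input.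
def Pre_solve_register_brute (num_vertices : Int) (arcs : List (Int × Int)) (bound : Int) : Prop :=
  num_vertices = 0 ∨ 12 < num_vertices ∨
    ∀ p ∈ arcs, (-num_vertices ≤ p.1 ∧ p.1 < num_vertices ∧ -num_vertices ≤ p.2 ∧ p.2 < num_vertices)
instance (num_vertices : Int) (arcs : List (Int × Int)) (bound : Int) : Decidable (Pre_solve_register_brute num_vertices arcs bound) := by unfold Pre_solve_register_brute; infer_instance

def pvWitness_solve_register_brute : Int × (List (Int × Int)) × Int := (3, [(1, 0), (2, 1)], 2)

def Spec_solve_register_brute (num_vertices : Int) (arcs : List (Int × Int)) (bound : Int) (out : Option (List Int)) : Prop := out = solve_register_brute_alt num_vertices arcs bound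
instance (num_vertices : Int) (arcs : List (Int × Int)) (bound : Int) (out : Option (List Int)) : Decidable (Spec_solve_register_brute num_vertices arcs bound out) := by unfold Spec_solve_register_brute; infer_instance

-- ===== CLAIM (what is proved, stated in full; the proofs are below) =====
def Claim_equal_solve_register_brute : Prop := ∀ (num_vertices : Int) (arcs : List (Int × Int)) (bound : Int), Dom_solve_register_brute num_vertices arcs bound → Pre_solve_register_brute num_vertices arcs bound → Spec_solve_register_brute num_vertices arcs bound (solve_register_brute num_vertices arcs bound)

-- ===== LEMMAS AND PROOFS =====

theorem pv_findSome?_eq {α β : Type} (L : List α) (F : α → Option β) (P : α → Bool) (f : α → β)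
    (h : ∀ v ∈ L, F v = if P v then some (f v) else none) :
    L.findSome? F = (L.find? P).map f := by
  induction L with
  | nil => rfl
  | cons x xs ih =>
    rw [List.findSome?_cons, List.find?_cons, h x (List.mem_cons_self)]
    by_cases hx : P x
    · simp [hx]
    · simp only [Bool.not_eq_true] at hx
      simp [hx, ih (fun v hv => h v (List.mem_cons_of_mem _ hv))]

theorem pv_len_eq {l₁ l₂ : List Int} (h1 : l₁.Nodup) (h2 : l₂.Nodup)
    (h : ∀ x, x ∈ l₁ ↔ x ∈ l₂) : l₁.length = l₂.length :=
  ((List.perm_ext_iff_of_nodup h1 h2).mpr h).length_eq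

theorem pv_full (n : Int) (ev : PySem.Set Int) (k : Nat)
    (hn : (k : Int) = n) (hnodup : ev.Nodup) (hsub : ∀ x ∈ ev, x ∈ PySem.List.pyRange 0 n 1)
    (hlen : ev.length = k) : ∀ x ∈ PySem.List.pyRange 0 n 1, x ∈ ev := by
  subst hn
  have hlenr : (PySem.List.pyRange 0 (k : Int) 1).length = k := by
    simpa using congrArg List.length (PySem.List.pyRange_zero_natCast k)
  have hnr : (PySem.List.pyRange 0 (k : Int) 1).Nodup := by
    simp only [PySem.List.nodup_pyRange_one]
  have hperm := (List.Nodup.subperm hnodup (fun x hx => hsub x hx)).perm_of_length_le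
    (by omega)
  intro x hx
  exact hperm.mem_iff.mpr hx

theorem btA_none_of_gt (n : Int) (preds succs : List (PySem.Set Int)) (bound : Int)
    (f : Nat) (order : List Int) (ev live : PySem.Set Int) (cmax : Int)
    (h : bound < cmax) : btA n preds succs bound f order ev live cmax = none := by
  cases f with
  | zero =>
    simp only [btA]
    split_ifs with h1 h2
    · exact absurd h2 (not_le.mpr h)
    · rfl
    · rfl
  | succ g =>
    simp only [btA]
    split_ifs with h1 h2 h3 <;>
      first
        | rfl
        | exact absurd h2 (not_le.mpr h)
        | exact absurd h h3

theorem pvFeas_false_of_neg (n : Int) (preds succs : List (PySem.Set Int)) (bound : Int)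
    (f : Nat) (ev : PySem.Set Int) (hb : bound < 0) (hne : ¬ PySem.Set.len ev = n) :
    pvFeas n preds succs bound f ev = false := by
  cases f with
  | zero => simp only [pvFeas]; rw [if_neg hne]
  | succ g =>
    simp only [pvFeas]
    rw [if_neg hne, List.any_eq_false]
    intro v hv
    have h0 : (0 : Int) ≤ ((pvLive succs (PySem.Set.add ev v)).length : Int) := Int.natCast_nonneg _
    simp only [Bool.and_eq_true, decide_eq_true_eq, not_and]
    intro hle
    omega

theorem pv_stepLive_nodup (succs : List (PySem.Set Int)) (ev' live : PySem.Set Int) (v : Int)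
    (h : live.Nodup) : (pvStepLive succs ev' live v).Nodup :=
  PySem.Set.nodup_diff _ _ (PySem.Set.nodup_union _ _ h)

theorem pv_live_mem (succs : List (PySem.Set Int)) (ev : PySem.Set Int) (x : Int) :
    x ∈ pvLive succs ev ↔ x ∈ ev ∧
      (!(pvS succs x).isEmpty && PySem.Set.issubset (pvS succs x) ev) = false := by
  unfold pvLive
  rw [List.mem_filter]
  cases hb : (!(pvS succs x).isEmpty && PySem.Set.issubset (pvS succs x) ev) <;> simp [hb]

theorem pv_step_mem (succs : List (PySem.Set Int)) (E live : PySem.Set Int) (v x : Int) :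
    x ∈ pvStepLive succs E live v ↔
      (x ∈ live ∨ x = v) ∧
      (!(pvS succs x).isEmpty && PySem.Set.issubset (pvS succs x) E) = false := by
  unfold pvStepLive
  rw [PySem.Set.mem_diff, List.mem_filter]
  cases hb : (!(pvS succs x).isEmpty && PySem.Set.issubset (pvS succs x) E) <;>
    simp [PySem.Set.mem_union, hb] <;> tauto

theorem pv_bcond_mono (succs : List (PySem.Set Int)) (ev : PySem.Set Int) (v x : Int)
    (h : (!(pvS succs x).isEmpty && PySem.Set.issubset (pvS succs x) (PySem.Set.add ev v)) = false) :
    (!(pvS succs x).isEmpty && PySem.Set.issubset (pvS succs x) ev) = false := by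
  cases h1 : (!(pvS succs x).isEmpty) with
  | false => simp [h1]
  | true =>
    cases h2 : PySem.Set.issubset (pvS succs x) ev with
    | false => simp [h1, h2]
    | true =>
      exfalso
      have hsub' : PySem.Set.issubset (pvS succs x) (PySem.Set.add ev v) = true :=
        (PySem.Set.issubset_iff _ _).mpr (fun y hy =>
          (PySem.Set.mem_add ev v y).mpr (Or.inl ((PySem.Set.issubset_iff _ _).mp h2 y hy)))
      rw [h1, hsub'] at h
      simp at h

theorem pv_stepLive_mem (succs : List (PySem.Set Int)) (ev live : PySem.Set Int) (v x : Int)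
    (hlive : ∀ y, y ∈ live ↔ y ∈ pvLive succs ev) :
    (x ∈ pvStepLive succs (PySem.Set.add ev v) live v ↔ x ∈ pvLive succs (PySem.Set.add ev v)) := by
  have hx := hlive x
  rw [pv_live_mem succs ev x] at hx
  rw [pv_step_mem succs (PySem.Set.add ev v) live v x, pv_live_mem succs (PySem.Set.add ev v) x]
  constructor
  · rintro ⟨hm, hf⟩
    refine ⟨(PySem.Set.mem_add ev v x).mpr ?_, hf⟩
    rcases hm with hm | hm
    · exact Or.inl (hx.mp hm).1
    · exact Or.inr hm
  · rintro ⟨hm, hf⟩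
    refine ⟨?_, hf⟩
    rcases (PySem.Set.mem_add ev v x).mp hm with hm' | hm'
    · exact Or.inl (hx.mpr ⟨hm', pv_bcond_mono succs ev v x hf⟩)
    · exact Or.inr hm'

theorem pv_main (n : Int) (preds succs : List (PySem.Set Int)) (bound : Int)
    (fuel : Nat) (order : List Int) (ev live : PySem.Set Int) (cmax : Int)
    (hnodup : ev.Nodup)
    (hlen : ev.length = order.length)
    (hsub : ∀ x ∈ ev, x ∈ PySem.List.pyRange 0 n 1)
    (hlive : live.Nodup ∧ ∀ x, x ∈ live ↔ x ∈ pvLive succs ev)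
    (hcmax : cmax ≤ bound) :
    btA n preds succs bound fuel order ev live cmax =
      (if pvFeas n preds succs bound fuel ev then
        some (pvConfig n (order ++ pvWalk n preds succs bound fuel ev)) else none) := by
  induction fuel generalizing order ev live cmax with
  | zero =>
    have hlenC : ((ev.length : Nat) : Int) = ((order.length : Nat) : Int) := by
      omega
    simp only [btA, pvFeas, pvWalk]
    by_cases hn : ((order.length : Nat) : Int) = n
    · simp [hn, hlenC, hcmax, PySem.Set.len]
    · simp [hn, hlenC, PySem.Set.len]
  | succ fuel ih =>
    have hlenS : PySem.Set.len ev = ((order.length : Nat) : Int) := by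
      simp [PySem.Set.len, hlen]
    have hlenC : ((ev.length : Nat) : Int) = ((order.length : Nat) : Int) := by
      omega
    by_cases hn : ((order.length : Nat) : Int) = n
    · -- leaf: evaluated is all of range(n), nothing is available, the walk stops
      have hfull := pv_full n ev order.length hn hnodup hsub hlen
      have havail : pvAvail n preds ev = [] := by
        unfold pvAvail
        rw [List.filter_eq_nil_iff]
        intro v hv
        simp only [Bool.and_eq_true, Bool.not_eq_true', not_and]
        intro hc
        rw [(PySem.Set.contains_iff ev v).mpr (hfull v hv)] at hc
        simp at hc
      simp only [btA, pvFeas, pvWalk]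
      simp [hn, hlenS, hlenC, hcmax, pvSortedAvail, havail, PySem.List.sorted, PySem.Set.len]
    · -- interior node
      have hnb : ¬ bound < cmax := not_lt.mpr hcmax
      have hnodupPL : (pvLive succs ev).Nodup := hnodup.filter _
      have hperm : live.Perm (pvLive succs ev) :=
        (List.perm_ext_iff_of_nodup hlive.1 hnodupPL).mpr hlive.2
      have hkey : pvKey succs ev live = pvKey succs ev (pvLive succs ev) := by
        funext v
        unfold pvKey
        rw [(hperm.map _).sum_eq]
      have hLA : pvSortedAvail n preds succs ev live
          = pvSortedAvail n preds succs ev (pvLive succs ev) := by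
        unfold pvSortedAvail
        rw [hkey]
      have hLmem : ∀ x, x ∈ pvSortedAvail n preds succs ev (pvLive succs ev) ↔
          x ∈ pvAvail n preds ev := by
        intro x
        unfold pvSortedAvail
        exact PySem.List.mem_sorted _ _ _ x
      have hchild : ∀ v ∈ pvSortedAvail n preds succs ev (pvLive succs ev),
          (btA n preds succs bound fuel (order ++ [v]) (PySem.Set.add ev v)
            (pvStepLive succs (PySem.Set.add ev v) live v)
            (max cmax ((pvStepLive succs (PySem.Set.add ev v) live v).length : Int)))
          = if (decide (((pvLive succs (PySem.Set.add ev v)).length : Int) ≤ bound) &&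
                pvFeas n preds succs bound fuel (PySem.Set.add ev v)) then
              some (pvConfig n ((order ++ [v]) ++ pvWalk n preds succs bound fuel (PySem.Set.add ev v)))
            else none := by
        intro v hvL
        have hvA : v ∈ pvAvail n preds ev := (hLmem v).mp hvL
        have hvR : v ∈ PySem.List.pyRange 0 n 1 := (List.mem_filter.mp hvA).1
        have hvNin : v ∉ ev := by
          have h2 := (List.mem_filter.mp hvA).2
          simp at h2
          exact h2.1
        have hnodup' : (PySem.Set.add ev v).Nodup := PySem.Set.nodup_add _ _ hnodup
        have hlen' : (PySem.Set.add ev v).length = (order ++ [v]).length := by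
          rw [PySem.Set.add_of_not_mem hvNin]
          simp [hlen]
        have hsub' : ∀ x ∈ PySem.Set.add ev v, x ∈ PySem.List.pyRange 0 n 1 := by
          intro x hx
          rcases (PySem.Set.mem_add ev v x).mp hx with h | h
          · exact hsub x h
          · exact h ▸ hvR
        have hmem' : ∀ x, x ∈ pvStepLive succs (PySem.Set.add ev v) live v ↔
            x ∈ pvLive succs (PySem.Set.add ev v) :=
          fun x => pv_stepLive_mem succs ev live v x hlive.2
        have hnodupSL : (pvStepLive succs (PySem.Set.add ev v) live v).Nodup :=
          pv_stepLive_nodup _ _ _ _ hlive.1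
        have hnodupPL' : (pvLive succs (PySem.Set.add ev v)).Nodup := by
          unfold pvLive
          exact hnodup'.filter _
        have hlenEq : ((pvStepLive succs (PySem.Set.add ev v) live v).length : Int)
            = ((pvLive succs (PySem.Set.add ev v)).length : Int) := by
          have h := pv_len_eq hnodupSL hnodupPL' hmem'
          omega
        by_cases hB : ((pvLive succs (PySem.Set.add ev v)).length : Int) ≤ bound
        · have hcm' : max cmax ((pvStepLive succs (PySem.Set.add ev v) live v).length : Int) ≤ bound := by
            rw [hlenEq]
            exact max_le hcmax hB
          rw [ih (order ++ [v]) (PySem.Set.add ev v) _ _ hnodup' hlen' hsub' ⟨hnodupSL, hmem'⟩ hcm']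
          simp [hB]
        · have hgt : bound < max cmax ((pvStepLive succs (PySem.Set.add ev v) live v).length : Int) := by
            have h1 := le_max_right cmax ((pvStepLive succs (PySem.Set.add ev v) live v).length : Int)
            rw [hlenEq] at h1 ⊢
            omega
          rw [btA_none_of_gt n preds succs bound fuel _ _ _ _ hgt]
          simp [hB]
      simp only [btA, pvFeas, pvWalk]
      rw [if_neg hn, if_neg hnb, hlenS, if_neg hn, hLA]
      rw [pv_findSome?_eq _ _
        (fun v => decide (((pvLive succs (PySem.Set.add ev v)).length : Int) ≤ bound) &&
          pvFeas n preds succs bound fuel (PySem.Set.add ev v))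
        (fun v => pvConfig n ((order ++ [v]) ++ pvWalk n preds succs bound fuel (PySem.Set.add ev v)))
        hchild]
      have hany : (pvAvail n preds ev).any
            (fun v => decide (((pvLive succs (PySem.Set.add ev v)).length : Int) ≤ bound) &&
              pvFeas n preds succs bound fuel (PySem.Set.add ev v))
          = (pvSortedAvail n preds succs ev (pvLive succs ev)).any
            (fun v => decide (((pvLive succs (PySem.Set.add ev v)).length : Int) ≤ bound) &&
              pvFeas n preds succs bound fuel (PySem.Set.add ev v)) := by
        apply Bool.eq_iff_iff.mpr
        simp only [List.any_eq_true]
        constructor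
        · rintro ⟨x, h1, h2⟩
          exact ⟨x, (hLmem x).mpr h1, h2⟩
        · rintro ⟨x, h1, h2⟩
          exact ⟨x, (hLmem x).mp h1, h2⟩
      rw [hany]
      cases hfind : (pvSortedAvail n preds succs ev (pvLive succs ev)).find?
          (fun v => decide (((pvLive succs (PySem.Set.add ev v)).length : Int) ≤ bound) &&
            pvFeas n preds succs bound fuel (PySem.Set.add ev v)) with
      | none =>
        have hanyf : (pvSortedAvail n preds succs ev (pvLive succs ev)).any
            (fun v => decide (((pvLive succs (PySem.Set.add ev v)).length : Int) ≤ bound) &&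
              pvFeas n preds succs bound fuel (PySem.Set.add ev v)) = false := by
          rw [List.any_eq_false]
          intro x hx
          have := List.find?_eq_none.mp hfind x hx
          simpa using this
        rw [hfind] at *
        simp [hanyf]
      | some v =>
        have hPv := List.find?_some hfind
        have hvL := List.mem_of_find?_eq_some hfind
        have hanyt : (pvSortedAvail n preds succs ev (pvLive succs ev)).any
            (fun v => decide (((pvLive succs (PySem.Set.add ev v)).length : Int) ≤ bound) &&
              pvFeas n preds succs bound fuel (PySem.Set.add ev v)) = true :=
          List.any_eq_true.mpr ⟨v, hvL, hPv⟩
        rw [hfind] at *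
        simp [hanyt]

-- ===== VERDICT (by name: the statement is the Claim_ definition above) =====
theorem solve_register_brute_spec : Claim_equal_solve_register_brute := by
  intro n arcs bound _ _
  unfold Spec_solve_register_brute solve_register_brute solve_register_brute_alt
  by_cases h0 : n = 0
  · simp [h0]
  · by_cases h12 : 12 < n
    · simp [h0, h12]
    · rw [if_neg h0, if_neg h12, if_neg h0, if_neg h12]
      by_cases hb : (0 : Int) ≤ bound
      · rw [pv_main n (pvAdj n arcs).1 (pvAdj n arcs).2 bound n.toNat [] PySem.Set.empty PySem.Set.empty 0
          List.nodup_nil rfl (by intro x hx; cases hx)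
          ⟨List.nodup_nil, by intro x; simp [pvLive, PySem.Set.empty]⟩ hb]
        simp
      · rw [btA_none_of_gt n (pvAdj n arcs).1 (pvAdj n arcs).2 bound n.toNat [] _ _ 0 (by omega)]
        rw [pvFeas_false_of_neg n (pvAdj n arcs).1 (pvAdj n arcs).2 bound n.toNat PySem.Set.empty
          (by omega) (by simp [PySem.Set.len, PySem.Set.empty]; omega)]
        simp
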